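-- pv_equiv track=rewrite | github.com/MauroB3/quixo | src/heuristic.py | value_of_list
-- ===== SOURCE A (Python) =====
-- def value_of_list(listc, player):
--     score = 0
--     best_score = 0
--     for pos in range(5):
--         if listc[pos] == player:
--             score += 1
--             best_score = max(best_score, score)
--         else:
--             score = 0
--     return best_score * best_score
-- ===== SOURCE B (Python) =====
-- def value_of_list(listc, player):
--     # Longest-run-by-window-search: the longest consecutive run of `player` among the
--     # first five cells equals the largest k such that SOME window of k consecutive
--     # cells is entirely `player`.  Try k = 5, 4, ..., 1 and return the first hit, squared.
--     cells = [listc[i] for i in range(5)]   # indexes 0..4, so short lists raise IndexError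
--     for k in range(5, 0, -1):
--         if any(all(cells[s + j] == player for j in range(k)) for s in range(6 - k)):
--             return k * k
--     return 0
-- ===== Notes on version B (the rewrite author's own statement) =====
-- stated objective: alternative
-- what changed: Replaces A's single-pass run counter by a staged window-existence search: materialize the first five cells, then for k = 5 down to 1 test whether any window of k consecutive cells is entirely player, returning the first such k squared (0 if none).
import Mathlib
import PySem

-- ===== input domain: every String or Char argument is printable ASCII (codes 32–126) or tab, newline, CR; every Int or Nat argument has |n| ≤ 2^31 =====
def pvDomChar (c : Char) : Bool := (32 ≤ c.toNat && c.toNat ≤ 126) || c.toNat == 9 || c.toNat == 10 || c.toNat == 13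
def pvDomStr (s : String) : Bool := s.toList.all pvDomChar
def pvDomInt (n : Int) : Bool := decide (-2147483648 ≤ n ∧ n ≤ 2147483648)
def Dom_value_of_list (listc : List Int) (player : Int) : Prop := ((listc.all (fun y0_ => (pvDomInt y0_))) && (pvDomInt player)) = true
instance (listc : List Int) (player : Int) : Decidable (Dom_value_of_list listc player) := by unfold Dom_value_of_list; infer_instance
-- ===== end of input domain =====

-- B replaces A's single-pass run counter by a staged window-existence search
-- (largest k with an all-player window of k consecutive cells, squared); alternative
-- decomposition, same cost; return values agree on all lists of length ≥ 5.

-- ===== PORT A =====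
-- for pos in range(5): if listc[pos]==player: score+=1; best=max(best,score) else: score=0
-- State is Option (score, best); none = IndexError (excluded by Pre_).
def value_of_list (listc : List Int) (player : Int) : Int :=
  match (PySem.List.pyRange 0 5 1).foldl
      (fun (st : Option (Int × Int)) pos =>
        st.bind fun sb =>
          match PySem.List.pyGet? listc pos with
          | some v =>
              if v = player then some (sb.1 + 1, max sb.2 (sb.1 + 1))
              else some (0, sb.2)
          | none => none)
      (some (0, 0)) with
  | some sb => sb.2 * sb.2
  | none => 0            -- IndexError: unreachable under Pre_value_of_list

-- ===== PORT B =====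
-- any(all(cells[s+j] == player for j in range(k)) for s in range(6-k)); the indices
-- s+j are nonnegative and < 5 = len(cells), so plain getD is exact here.
def windowHit (cells : List Int) (player : Int) (k : Nat) : Bool :=
  (List.range (6 - k)).any (fun s => (List.range k).all (fun j => cells.getD (s + j) 0 == player))

-- for k in range(5, 0, -1): if <window hit> return k*k; fallthrough returns 0.
def searchK (cells : List Int) (player : Int) : List Nat → Int
  | [] => 0
  | k :: ks => if windowHit cells player k then (k : Int) * (k : Int) else searchK cells player ks

-- cells = [listc[i] for i in range(5)]; then the k = 5,4,3,2,1 search.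
def value_of_list_alt (listc : List Int) (player : Int) : Int :=
  match (PySem.List.pyRange 0 5 1).mapM (fun i => PySem.List.pyGet? listc i) with
  | none => 0            -- IndexError building cells: unreachable under Pre_value_of_list
  | some cells => searchK cells player [5, 4, 3, 2, 1]

-- ===== PRECONDITION & SPEC =====
-- A indexes listc[0..4], so it raises IndexError on lists shorter than 5; excluded.
def Pre_value_of_list (listc : List Int) (player : Int) : Prop := 5 ≤ listc.length
instance (listc : List Int) (player : Int) : Decidable (Pre_value_of_list listc player) := by
  unfold Pre_value_of_list; infer_instance
def pvWitness_value_of_list : List Int × Int := ([1, 1, 0, 1, 1], 1)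
def Spec_value_of_list (listc : List Int) (player : Int) (out : Int) : Prop := out = value_of_list_alt listc player
instance (listc : List Int) (player : Int) (out : Int) : Decidable (Spec_value_of_list listc player out) := by unfold Spec_value_of_list; infer_instance

-- ===== CLAIM (what is proved, stated in full; the proofs are below) =====
def Claim_equal_value_of_list : Prop := ∀ (listc : List Int) (player : Int), Dom_value_of_list listc player → Pre_value_of_list listc player → Spec_value_of_list listc player (value_of_list listc player)

-- ===== LEMMAS AND PROOFS =====

-- ===== VERDICT (by name: the statement is the Claim_ definition above) =====
set_option maxHeartbeats 3200000 in
theorem value_of_list_spec : Claim_equal_value_of_list := by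
  intro listc player _ hpre
  unfold Pre_value_of_list at hpre
  unfold Spec_value_of_list
  have hr : PySem.List.pyRange 0 5 1
      = [((0:Nat):Int), ((1:Nat):Int), ((2:Nat):Int), ((3:Nat):Int), ((4:Nat):Int)] := by decide
  match listc, hpre with
  | a :: b :: c :: d :: e :: rest, _ =>
    have hm : List.mapM (fun i => PySem.List.pyGet? (a::b::c::d::e::rest) i)
        [((0:Nat):Int), ((1:Nat):Int), ((2:Nat):Int), ((3:Nat):Int), ((4:Nat):Int)]
        = some [a, b, c, d, e] := by
      simp only [List.mapM_cons, List.mapM_nil, PySem.List.pyGet?_natCast]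
      simp
    by_cases h1 : a = player <;> by_cases h2 : b = player <;> by_cases h3 : c = player <;>
      by_cases h4 : d = player <;> by_cases h5 : e = player <;>
      simp only [value_of_list, value_of_list_alt, hr, hm, List.foldl,
        PySem.List.pyGet?_natCast] <;>
      simp [searchK, windowHit, List.range_succ, h1, h2, h3, h4, h5]
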